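-- pv_equiv track=rewrite | github.com/DAT210/Booking | src/templatebuild.py | buildTimesButtons
-- ===== SOURCE A (Python) =====
-- def buildTimesButtons(arrayVal,fullTimes):
--     htmlButtons=""
--     i=0;
--     j=0;
--     for val in arrayVal:
--         if i==0:
--             htmlButtons+="<div class='row'>"
--         i+=1
--         htmlButtons+="<div class='col-lg-6'><button class='btn btn-danger btnTime form-control fullTime"+str(fullTimes[j])+"'>"+str(val[1])+"</button></div>"
--         j+=1
--         if i==2:
--             htmlButtons+="</div><br>"
--             i=0
--     return htmlButtons
-- ===== SOURCE B (Python) =====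
-- def buildTimesButtons(arrayVal, fullTimes):
--     n = len(arrayVal)
--     parts = []
--     for k in range(0, n, 2):
--         parts.append("<div class='row'>")
--         for idx in (k, k + 1):
--             if idx < n:
--                 parts.append("<div class='col-lg-6'><button class='btn btn-danger btnTime form-control fullTime"
--                              + str(fullTimes[idx]) + "'>" + str(arrayVal[idx][1]) + "</button></div>")
--         if k + 1 < n:
--             parts.append("</div><br>")
--     return "".join(parts)
-- ===== Notes on version B (the rewrite author's own statement) =====
-- stated objective: alternative
-- what changed: Replaces A's flat single pass with a toggling counter i and running index j by a nested rows/pair traversal: an outer loop over chunk starts range(0, n, 2) emits one row per chunk, an inner loop over the two in-range indices emits the buttons by explicit indexing into arrayVal and fullTimes, the row is closed only when the chunk is a full pair, and the pieces are joined at the end.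
import Mathlib
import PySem

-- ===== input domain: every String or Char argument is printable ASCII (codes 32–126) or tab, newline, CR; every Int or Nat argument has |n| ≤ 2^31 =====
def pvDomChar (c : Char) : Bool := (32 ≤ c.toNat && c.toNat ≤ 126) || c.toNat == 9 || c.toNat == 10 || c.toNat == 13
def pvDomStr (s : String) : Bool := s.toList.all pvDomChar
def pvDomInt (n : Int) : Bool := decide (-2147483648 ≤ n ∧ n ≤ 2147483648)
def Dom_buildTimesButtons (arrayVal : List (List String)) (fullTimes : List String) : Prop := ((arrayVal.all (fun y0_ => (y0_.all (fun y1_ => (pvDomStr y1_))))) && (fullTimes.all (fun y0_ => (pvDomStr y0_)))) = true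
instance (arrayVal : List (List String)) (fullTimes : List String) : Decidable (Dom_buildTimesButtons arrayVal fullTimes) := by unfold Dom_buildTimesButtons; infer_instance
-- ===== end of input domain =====

-- B replaces A's flat state-machine pass (toggling counter i, running index j, one growing
-- string) by a nested rows/pairs traversal over chunk starts range(0, n, 2) with explicit
-- indexing, joining the collected pieces at the end (alternative decomposition, same cost).

-- ===== PORT A =====
-- state: (htmlButtons, i, j); fullTimes[j] and val[1] via pyGet? (none = IndexError, excluded by Pre_)
def stepA (fullTimes : List String) (st : String × Int × Int) (val : List String) : String × Int × Int :=
  let h := if st.2.1 == 0 then st.1 ++ "<div class='row'>" else st.1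
  let i := st.2.1 + 1
  let h := h ++ "<div class='col-lg-6'><button class='btn btn-danger btnTime form-control fullTime"
             ++ ((PySem.List.pyGet? fullTimes st.2.2).getD "") ++ "'>"
             ++ ((PySem.List.pyGet? val 1).getD "") ++ "</button></div>"
  let j := st.2.2 + 1
  if i == 2 then (h ++ "</div><br>", 0, j) else (h, i, j)

def buildTimesButtons (arrayVal : List (List String)) (fullTimes : List String) : String :=
  (arrayVal.foldl (stepA fullTimes) ("", 0, 0)).1

-- ===== PORT B =====
-- one button, by explicit indexing: fullTimes[idx] and arrayVal[idx][1]
def btnB (arrayVal : List (List String)) (fullTimes : List String) (idx : Int) : String :=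
  "<div class='col-lg-6'><button class='btn btn-danger btnTime form-control fullTime"
    ++ ((PySem.List.pyGet? fullTimes idx).getD "") ++ "'>"
    ++ ((PySem.List.pyGet? ((PySem.List.pyGet? arrayVal idx).getD []) 1).getD "") ++ "</button></div>"

-- one chunk: open the row, the in-range buttons of the pair (k, k+1), close only a full pair
def rowChunk (arrayVal : List (List String)) (fullTimes : List String) (n k : Int) : List String :=
  ["<div class='row'>"]
    ++ ([k, k + 1].foldl (fun acc idx =>
          if idx < n then acc ++ [btnB arrayVal fullTimes idx] else acc) [])
    ++ (if k + 1 < n then ["</div><br>"] else [])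

def buildTimesButtons_alt (arrayVal : List (List String)) (fullTimes : List String) : String :=
  let n : Int := arrayVal.length
  let parts := (PySem.List.pyRange 0 n 2).foldl
    (fun parts k => parts ++ rowChunk arrayVal fullTimes n k) []
  PySem.Str.join "" parts

-- ===== PRECONDITION & SPEC =====
-- A raises IndexError when fullTimes is shorter than arrayVal (fullTimes[j]) or some row has
-- fewer than 2 entries (val[1]); exactly those inputs are excluded.
def Pre_buildTimesButtons (arrayVal : List (List String)) (fullTimes : List String) : Prop :=
  arrayVal.length ≤ fullTimes.length ∧ ∀ v ∈ arrayVal, 2 ≤ v.length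
instance (arrayVal : List (List String)) (fullTimes : List String) : Decidable (Pre_buildTimesButtons arrayVal fullTimes) := by unfold Pre_buildTimesButtons; infer_instance
def pvWitness_buildTimesButtons : List (List String) × List String := ([["08:00", "09:00"], ["09:00", "10:00"], ["10:00", "11:00"]], ["1", "2", "3"])

def Spec_buildTimesButtons (arrayVal : List (List String)) (fullTimes : List String) (out : String) : Prop := out = buildTimesButtons_alt arrayVal fullTimes
instance (arrayVal : List (List String)) (fullTimes : List String) (out : String) : Decidable (Spec_buildTimesButtons arrayVal fullTimes out) := by unfold Spec_buildTimesButtons; infer_instance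

-- ===== CLAIM (what is proved, stated in full; the proofs are below) =====
def Claim_equal_buildTimesButtons : Prop := ∀ (arrayVal : List (List String)) (fullTimes : List String), Dom_buildTimesButtons arrayVal fullTimes → Pre_buildTimesButtons arrayVal fullTimes → Spec_buildTimesButtons arrayVal fullTimes (buildTimesButtons arrayVal fullTimes)

-- ===== LEMMAS AND PROOFS =====

def btnG (f : String) (v : List String) : String :=
  "<div class='col-lg-6'><button class='btn btn-danger btnTime form-control fullTime"
    ++ f ++ "'>" ++ ((PySem.List.pyGet? v 1).getD "") ++ "</button></div>"

-- common characterisation of the output, in pairs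
def g : List (List String) → List String → String
  | v1 :: v2 :: vs, f1 :: f2 :: fs =>
      "<div class='row'>" ++ btnG f1 v1 ++ btnG f2 v2 ++ "</div><br>" ++ g vs fs
  | v :: _, f :: _ => "<div class='row'>" ++ btnG f v
  | _, _ => ""

theorem loopA (vals : List (List String)) (fts pre : List String) (h : String)
    (hl : vals.length ≤ fts.length) :
    (vals.foldl (stepA (pre ++ fts)) (h, 0, (pre.length : Int))).1 = h ++ g vals fts := by
  induction vals, fts using g.induct generalizing pre h with
  | case1 v1 v2 vs f1 f2 fs ih =>
      have g1 : PySem.List.pyGet? (pre ++ f1 :: f2 :: fs) (pre.length : Int) = some f1 :=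
        PySem.List.pyGet?_append_length ..
      have g2 : PySem.List.pyGet? (pre ++ f1 :: f2 :: fs) ((pre.length : Int) + 1) = some f2 := by
        have e : pre ++ f1 :: f2 :: fs = (pre ++ [f1]) ++ f2 :: fs := by simp
        have hc : ((pre.length : Int) + 1) = (((pre ++ [f1]).length : Nat) : Int) := by
          simp
        rw [e, hc]
        exact PySem.List.pyGet?_append_length ..
      simp only [List.foldl_cons]
      rw [show stepA (pre ++ f1 :: f2 :: fs) (h, 0, (pre.length : Int)) v1
            = (h ++ "<div class='row'>" ++ btnG f1 v1, 1, (pre.length : Int) + 1) by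
            simp [stepA, btnG, g1, String.append_assoc, Prod.ext_iff]
            apply String.toList_inj.mp; simp]
      rw [show stepA (pre ++ f1 :: f2 :: fs)
              (h ++ "<div class='row'>" ++ btnG f1 v1, 1, (pre.length : Int) + 1) v2
            = (h ++ "<div class='row'>" ++ btnG f1 v1 ++ btnG f2 v2 ++ "</div><br>", 0,
               (pre.length : Int) + 2) by
            simp [stepA, btnG, g2, String.append_assoc, Prod.ext_iff]
            refine ⟨by apply String.toList_inj.mp; simp, by ring⟩]
      have e2 : pre ++ f1 :: f2 :: fs = (pre ++ [f1, f2]) ++ fs := by simp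
      have hc2 : ((pre.length : Int) + 2) = (((pre ++ [f1, f2]).length : Nat) : Int) := by
        simp
      rw [e2, hc2, ih (pre ++ [f1, f2]) _ (by simpa using hl)]
      simp only [g]
      apply String.toList_inj.mp; simp
  | case2 v vs f fs hne =>
      match vs, fs, hne, hl with
      | [], f' :: fs', hne, hl =>
          have g1 : PySem.List.pyGet? (pre ++ f :: f' :: fs') (pre.length : Int) = some f :=
            PySem.List.pyGet?_append_length ..
          simp [g, stepA, btnG, g1, String.append_assoc]
          apply String.toList_inj.mp; simp
      | [], [], hne, hl =>
          have g1 : PySem.List.pyGet? (pre ++ [f]) (pre.length : Int) = some f :=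
            PySem.List.pyGet?_append_length ..
          simp [g, stepA, btnG, g1, String.append_assoc]
          apply String.toList_inj.mp; simp
      | v' :: vs', [], hne, hl => simp at hl
      | v2 :: vs', f2 :: fs', hne, hl => exact (hne v2 vs' f2 fs' rfl rfl).elim
  | case3 t x h1 h2 =>
      match t, x, h1, h2, hl with
      | [], _, _, _, _ => simp [g]
      | v :: vs, [], h1, h2, hl => simp at hl
      | v :: vs, f :: fs, h1, h2, hl => exact (h2 v vs f fs rfl rfl).elim

-- step-2 range: induction forms
theorem pyRange_two_nil (a b : Int) (h : b ≤ a) : PySem.List.pyRange a b 2 = [] := by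
  rw [PySem.List.pyRange_of_pos a b (by norm_num)]
  rw [if_neg (by omega)]
  simp

theorem pyRange_two_cons (a b : Int) (h : a < b) :
    PySem.List.pyRange a b 2 = a :: PySem.List.pyRange (a + 2) b 2 := by
  rw [PySem.List.pyRange_of_pos a b (by norm_num),
      PySem.List.pyRange_of_pos (a + 2) b (by norm_num)]
  rw [if_pos h]
  by_cases h2 : a + 2 < b
  · rw [if_pos h2]
    have hn : ((b - a + 2 - 1) / 2).toNat = ((b - (a + 2) + 2 - 1) / 2).toNat + 1 := by
      omega
    rw [hn, List.range_succ_eq_map, List.map_cons, List.map_map]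
    refine congrArg₂ _ (by ring) ?_
    apply List.map_congr_left
    intro k _
    simp [Function.comp]
    ring
  · rw [if_neg h2]
    have hn : ((b - a + 2 - 1) / 2).toNat = 1 := by omega
    rw [hn]
    simp

theorem joinStr_cons (x : String) (xs : List String) :
    PySem.Str.join "" (x :: xs) = x ++ PySem.Str.join "" xs := by
  apply String.toList_inj.mp
  rw [String.toList_append, PySem.Str.toList_join, PySem.Str.toList_join]
  cases xs with
  | nil => simp [PySem.Chars.join_singleton, PySem.Chars.join_nil]
  | cons y ys =>
      rw [List.map_cons, List.map_cons, PySem.Chars.join_cons_cons]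
      simp

theorem joinStr_append (l1 l2 : List String) :
    PySem.Str.join "" (l1 ++ l2) = PySem.Str.join "" l1 ++ PySem.Str.join "" l2 := by
  induction l1 with
  | nil =>
      apply String.toList_inj.mp
      simp [PySem.Str.toList_join, PySem.Chars.join_nil]
  | cons x l ih =>
      rw [List.cons_append, joinStr_cons, ih, joinStr_cons, String.append_assoc]

-- the B loop, generalized over already-consumed prefixes of equal length
theorem loopB (vals : List (List String)) (fts : List String)
    (pa : List (List String)) (pf : List String) (parts : List String)
    (hpl : pa.length = pf.length) (hl : vals.length ≤ fts.length) :
    PySem.Str.join ""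
      ((PySem.List.pyRange (pa.length : Int) ((pa.length : Int) + (vals.length : Int)) 2).foldl
        (fun parts k => parts ++
          rowChunk (pa ++ vals) (pf ++ fts) ((pa.length : Int) + (vals.length : Int)) k) parts)
    = PySem.Str.join "" parts ++ g vals fts := by
  induction vals, fts using g.induct generalizing pa pf parts with
  | case1 v1 v2 vs f1 f2 fs ih =>
      have gv1 : PySem.List.pyGet? (pa ++ v1 :: v2 :: vs) (pa.length : Int) = some v1 :=
        PySem.List.pyGet?_append_length ..
      have gf1 : PySem.List.pyGet? (pf ++ f1 :: f2 :: fs) (pa.length : Int) = some f1 := by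
        rw [hpl]; exact PySem.List.pyGet?_append_length ..
      have gv2 : PySem.List.pyGet? (pa ++ v1 :: v2 :: vs) ((pa.length : Int) + 1) = some v2 := by
        have e : pa ++ v1 :: v2 :: vs = (pa ++ [v1]) ++ v2 :: vs := by simp
        have hc : ((pa.length : Int) + 1) = (((pa ++ [v1]).length : Nat) : Int) := by simp
        rw [e, hc]; exact PySem.List.pyGet?_append_length ..
      have gf2 : PySem.List.pyGet? (pf ++ f1 :: f2 :: fs) ((pa.length : Int) + 1) = some f2 := by
        have e : pf ++ f1 :: f2 :: fs = (pf ++ [f1]) ++ f2 :: fs := by simp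
        have hc : ((pa.length : Int) + 1) = (((pf ++ [f1]).length : Nat) : Int) := by
          simp [hpl]
        rw [e, hc]; exact PySem.List.pyGet?_append_length ..
      rw [pyRange_two_cons _ _ (by simp only [List.length_cons, List.length_nil, List.length_singleton]; push_cast; omega)]
      simp only [List.foldl_cons]
      rw [show rowChunk (pa ++ v1 :: v2 :: vs) (pf ++ f1 :: f2 :: fs)
              ((pa.length : Int) + ((v1 :: v2 :: vs).length : Int)) (pa.length : Int)
            = ["<div class='row'>", btnG f1 v1, btnG f2 v2, "</div><br>"] by
            simp only [rowChunk, List.foldl_cons, List.foldl_nil]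
            rw [if_pos (by simp only [List.length_cons, List.length_nil, List.length_singleton]; push_cast; omega), if_pos (by simp only [List.length_cons, List.length_nil, List.length_singleton]; push_cast; omega),
                if_pos (by simp only [List.length_cons, List.length_nil, List.length_singleton]; push_cast; omega)]
            simp [btnB, btnG, gv1, gf1, gv2, gf2]]
      have hstep : ∀ m : Int,
          ((pa.length : Int) + ((v1 :: v2 :: vs).length : Int))
            = ((((pa ++ [v1, v2]).length : Nat) : Int) + ((vs.length : Nat) : Int)) ∧
          ((pa.length : Int) + 2) = (((pa ++ [v1, v2]).length : Nat) : Int) := by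
        intro _; constructor <;> (push_cast; simp; try omega)
      obtain ⟨hn, ha⟩ := hstep 0
      rw [show (pa ++ v1 :: v2 :: vs) = ((pa ++ [v1, v2]) ++ vs) by simp,
          show (pf ++ f1 :: f2 :: fs) = ((pf ++ [f1, f2]) ++ fs) by simp,
          hn, ha,
          ih (pa ++ [v1, v2]) (pf ++ [f1, f2]) _ (by simp [hpl]) (by simpa using hl)]
      rw [joinStr_append]
      simp only [g]
      apply String.toList_inj.mp
      simp [PySem.Str.toList_join, PySem.Chars.join_nil, PySem.Chars.join_singleton,
        PySem.Chars.join_cons_cons]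
  | case2 v vs f fs hne =>
      match vs, fs, hne, hl with
      | [], fs, hne, hl =>
          have gv1 : PySem.List.pyGet? (pa ++ [v]) (pa.length : Int) = some v :=
            PySem.List.pyGet?_append_length ..
          have gf1 : PySem.List.pyGet? (pf ++ f :: fs) (pa.length : Int) = some f := by
            rw [hpl]; exact PySem.List.pyGet?_append_length ..
          rw [pyRange_two_cons _ _ (by simp only [List.length_cons, List.length_nil, List.length_singleton]; push_cast; omega)]
          simp only [List.foldl_cons]
          rw [show rowChunk (pa ++ [v]) (pf ++ f :: fs)
                  ((pa.length : Int) + (([v] : List (List String)).length : Int)) (pa.length : Int)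
                = ["<div class='row'>", btnG f v] by
                simp only [rowChunk, List.foldl_cons, List.foldl_nil]
                have hn1 : ((pa.length : Int) + (([v] : List (List String)).length : Int))
                    = (pa.length : Int) + 1 := by simp
                rw [hn1, if_pos (lt_add_one ((pa.length : Int))),
                    if_neg (lt_irrefl ((pa.length : Int) + 1)),
                    if_neg (lt_irrefl ((pa.length : Int) + 1))]
                simp [btnB, btnG, gv1, gf1]]
          rw [pyRange_two_nil _ _ (by simp only [List.length_cons, List.length_nil, List.length_singleton]; push_cast; omega)]
          simp only [List.foldl_nil]
          rw [joinStr_append]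
          simp only [g]
          apply String.toList_inj.mp
          simp [PySem.Str.toList_join, PySem.Chars.join_nil, PySem.Chars.join_cons_cons]
      | v' :: vs', [], hne, hl => simp at hl
      | v2 :: vs', f2 :: fs', hne, hl => exact (hne v2 vs' f2 fs' rfl rfl).elim
  | case3 t x h1 h2 =>
      match t, x, h1, h2, hl with
      | [], _, _, _, _ =>
          rw [show ((([] : List (List String)).length : Int)) = 0 by simp]
          rw [pyRange_two_nil _ _ (by omega)]
          simp only [List.foldl_nil, g]
          apply String.toList_inj.mp; simp
      | v :: vs, [], h1, h2, hl => simp at hl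
      | v :: vs, f :: fs, h1, h2, hl => exact (h2 v vs f fs rfl rfl).elim

-- ===== VERDICT (by name: the statement is the Claim_ definition above) =====
theorem buildTimesButtons_spec : Claim_equal_buildTimesButtons := by
  intro arrayVal fullTimes _ hpre
  unfold Spec_buildTimesButtons buildTimesButtons buildTimesButtons_alt
  have hA := loopA arrayVal fullTimes [] "" hpre.1
  simp only [List.nil_append, List.length_nil, Nat.cast_zero] at hA
  have hB := loopB arrayVal fullTimes [] [] [] rfl hpre.1
  simp only [List.nil_append, List.length_nil, Nat.cast_zero, zero_add] at hB
  rw [hA]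
  rw [show PySem.Str.join "" ([] : List String) = "" by
        apply String.toList_inj.mp; simp [PySem.Str.toList_join, PySem.Chars.join_nil]] at hB
  rw [show ("" : String) ++ g arrayVal fullTimes = g arrayVal fullTimes by
        apply String.toList_inj.mp; simp] at hB
  rw [← hB]
  apply String.toList_inj.mp; simp
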